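-- pv_equiv track=rewrite | github.com/DJPieter81/MTGSimManu | mtg_simulator_code/engine/bo3_runner.py | apply_sideboard
-- ===== SOURCE A (Python) =====
-- from typing import Dict, List, Optional, Tuple
--
-- def apply_sideboard(
--     mainboard: Dict[str, int],
--     sideboard: Dict[str, int],
--     cards_in: Dict[str, int],
--     cards_out: Dict[str, int],
-- ) -> Dict[str, int]:
--     """Apply sideboard swaps to a mainboard, returning the new deck list."""
--     new_deck = dict(mainboard)
--
--     # Remove cards_out
--     for card_name, count in cards_out.items():
--         if card_name in new_deck:
--             new_deck[card_name] -= count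
--             if new_deck[card_name] <= 0:
--                 del new_deck[card_name]
--
--     # Add cards_in
--     for card_name, count in cards_in.items():
--         new_deck[card_name] = new_deck.get(card_name, 0) + count
--
--     return new_deck
-- ===== SOURCE B (Python) =====
-- def apply_sideboard(mainboard, sideboard, cards_in, cards_out):
--     """Apply sideboard swaps to a mainboard, returning the new deck list."""
--     def survives(card):
--         # a mainboard card stays unless cards_out drags its count to <= 0
--         return card in mainboard and (
--             card not in cards_out or mainboard[card] - cards_out[card] > 0)
--
--     def final_count(card):
--         # closed form: no intermediate deck is ever built
--         if survives(card):
--             return mainboard[card] - cards_out.get(card, 0) + cards_in.get(card, 0)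
--         return cards_in[card]
--
--     order = [c for c in mainboard if survives(c)] + \
--             [c for c in cards_in if not survives(c)]
--     return {c: final_count(c) for c in order}
-- ===== Notes on version B (the rewrite author's own statement) =====
-- stated objective: alternative
-- what changed: A builds the deck by stateful mutation (copy the mainboard, subtract cards_out in place deleting entries that drop to <=0, then add cards_in in place); B never builds an intermediate deck: it defines a survival predicate and a closed-form per-card count combining all three dicts at once, computes the output key order (surviving mainboard keys then newly-introduced cards_in keys) and emits each final count pointwise in one comprehension.
import Mathlib
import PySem

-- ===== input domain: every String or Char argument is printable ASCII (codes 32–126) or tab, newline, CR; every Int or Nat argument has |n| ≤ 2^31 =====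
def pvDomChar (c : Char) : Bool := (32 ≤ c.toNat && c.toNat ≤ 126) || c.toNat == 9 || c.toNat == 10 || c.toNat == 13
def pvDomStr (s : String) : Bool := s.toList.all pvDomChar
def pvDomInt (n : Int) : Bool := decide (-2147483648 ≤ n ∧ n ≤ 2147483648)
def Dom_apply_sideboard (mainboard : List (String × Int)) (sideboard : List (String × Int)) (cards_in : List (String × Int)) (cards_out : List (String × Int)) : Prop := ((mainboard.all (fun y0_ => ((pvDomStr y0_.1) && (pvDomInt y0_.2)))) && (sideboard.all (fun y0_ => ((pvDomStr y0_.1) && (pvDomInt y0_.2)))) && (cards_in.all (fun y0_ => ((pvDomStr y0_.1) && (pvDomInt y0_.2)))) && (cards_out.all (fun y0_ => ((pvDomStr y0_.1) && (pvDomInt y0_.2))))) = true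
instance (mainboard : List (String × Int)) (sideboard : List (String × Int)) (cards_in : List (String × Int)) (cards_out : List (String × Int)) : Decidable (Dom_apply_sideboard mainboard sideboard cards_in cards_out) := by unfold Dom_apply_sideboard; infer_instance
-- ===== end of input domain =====

-- B replaces A's stateful mutation of an intermediate deck (subtract/delete loop, then add loop) by a
-- pointwise computation: a survival predicate plus a closed-form per-card count, emitted over a computed
-- key order, with no intermediate deck (objective: alternative).

-- ===== PORT A =====
-- Transliteration of A: copy the mainboard dict, loop over cards_out subtracting (the updated entry
-- `new_deck[card_name]` is the same insert expression read back) and deleting entries that drop to ≤ 0,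
-- then loop over cards_in adding counts (new_deck.get(card_name, 0) + count).
def apply_sideboard (mainboard : List (String × Int)) (sideboard : List (String × Int)) (cards_in : List (String × Int)) (cards_out : List (String × Int)) : List (String × Int) :=
  let new_deck0 : PySem.Dict String Int := PySem.Dict.ofList mainboard
  let new_deck1 := (PySem.Dict.ofList cards_out).items.foldl
    (fun d p =>
      if d.contains p.1 then
        if (d.insert p.1 (d.getD p.1 0 - p.2)).getD p.1 0 ≤ 0
        then (d.insert p.1 (d.getD p.1 0 - p.2)).erase p.1
        else d.insert p.1 (d.getD p.1 0 - p.2)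
      else d) new_deck0
  let new_deck2 := (PySem.Dict.ofList cards_in).items.foldl
    (fun d p => d.insert p.1 (d.getD p.1 0 + p.2)) new_deck1
  new_deck2.items

-- ===== PORT B =====
-- Transliteration of B: the `survives` predicate, the closed-form `final_count`, the `order` key list
-- (surviving mainboard keys, then cards_in keys that do not survive in the mainboard), and the final
-- comprehension emitting (c, final_count c) pointwise. `mainboard[card]`/`cards_in[card]` are guarded
-- lookups of present keys, ported as getD.
def apply_sideboard_alt (mainboard : List (String × Int)) (sideboard : List (String × Int)) (cards_in : List (String × Int)) (cards_out : List (String × Int)) : List (String × Int) :=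
  let dm : PySem.Dict String Int := PySem.Dict.ofList mainboard
  let dout : PySem.Dict String Int := PySem.Dict.ofList cards_out
  let din : PySem.Dict String Int := PySem.Dict.ofList cards_in
  let survives : String → Bool := fun c =>
    dm.contains c && (!dout.contains c || decide (dm.getD c 0 - dout.getD c 0 > 0))
  let final_count : String → Int := fun c =>
    if survives c then dm.getD c 0 - dout.getD c 0 + din.getD c 0 else din.getD c 0
  let order := (dm.items.map (fun p => p.1)).filter survives
            ++ (din.items.map (fun p => p.1)).filter (fun c => !survives c)
  order.map (fun c => (c, final_count c))

-- ===== PRECONDITION & SPEC =====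
def Spec_apply_sideboard (mainboard : List (String × Int)) (sideboard : List (String × Int)) (cards_in : List (String × Int)) (cards_out : List (String × Int)) (out : List (String × Int)) : Prop := out = apply_sideboard_alt mainboard sideboard cards_in cards_out
instance (mainboard : List (String × Int)) (sideboard : List (String × Int)) (cards_in : List (String × Int)) (cards_out : List (String × Int)) (out : List (String × Int)) : Decidable (Spec_apply_sideboard mainboard sideboard cards_in cards_out out) := by unfold Spec_apply_sideboard; infer_instance

-- ===== CLAIM (what is proved, stated in full; the proofs are below) =====
def Claim_equal_apply_sideboard : Prop := ∀ (mainboard : List (String × Int)) (sideboard : List (String × Int)) (cards_in : List (String × Int)) (cards_out : List (String × Int)), Dom_apply_sideboard mainboard sideboard cards_in cards_out → Spec_apply_sideboard mainboard sideboard cards_in cards_out (apply_sideboard mainboard sideboard cards_in cards_out)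

-- ===== LEMMAS AND PROOFS =====

lemma getD_mk_cons (k x : String) (v d0 : Int) (rest : List (String × Int)) :
    (PySem.Dict.mk ((k, v) :: rest)).getD x d0
    = if k == x then v else (PySem.Dict.mk rest).getD x d0 := by
  simp only [PySem.Dict.getD, PySem.Dict.get?_mk_cons]
  split <;> rfl

lemma contains_mk_cons (k x : String) (v : Int) (rest : List (String × Int)) :
    (PySem.Dict.mk ((k, v) :: rest)).contains x
    = (k == x || (PySem.Dict.mk rest).contains x) := by
  simp [PySem.Dict.contains_mk]

lemma contains_keys_eq (l : List (String × Int)) (s : String) :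
    (l.map (fun x => x.1)).contains s = l.any (fun p => p.1 == s) := by
  rw [List.contains_eq_mem]
  induction l with
  | nil => simp
  | cons a t ih =>
    simp only [List.map_cons, List.any_cons, List.mem_cons]
    by_cases h : a.1 = s
    · simp [h]
    · have hb : (a.1 == s) = false := by simpa using h
      have h2 : ¬ s = a.1 := fun hh => h hh.symm
      simpa [hb, h2] using ih

-- with nodup keys, the unique item with key k carries the looked-up value
lemma hgd_of_nodup (d : PySem.Dict String Int) (hd : d.keys.Nodup) (k : String) :
    ∀ q ∈ d.items, (q.1 == k) = true → q.2 = d.getD k 0 := by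
  intro q hq hqk
  have hqe : q.1 = k := by simpa using hqk
  have := PySem.Dict.getD_of_mem_items d (k := q.1) (v := q.2) (by simpa using hq) hd 0
  rw [hqe] at this
  exact this.symm

lemma hcr_of_not_mem (rest : List (String × Int)) (k : String)
    (ha : k ∉ rest.map (fun x => x.1)) :
    (PySem.Dict.mk rest : PySem.Dict String Int).contains k = false := by
  rw [PySem.Dict.contains_mk]
  cases hb : rest.any (fun p => p.1 == k) with
  | false => rfl
  | true =>
    exfalso
    rcases List.any_eq_true.mp hb with ⟨p, hp, hpk⟩
    have hpe : p.1 = k := by simpa using hpk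
    exact ha (hpe ▸ List.mem_map_of_mem (f := fun x => x.1) hp)

lemma map_filter_repl (k : String) (v : Int) (l : List (String × Int)) :
    (l.filter (fun p => !((if (p.1 == k) = true then (k, v) else p).1 == k))).map
        (fun p => if (p.1 == k) = true then (k, v) else p)
    = l.filter (fun p => !(p.1 == k)) := by
  induction l with
  | nil => rfl
  | cons a t ih =>
    rw [List.filter_cons, List.filter_cons]
    by_cases h : (a.1 == k) = true
    · have h1 : (!((if (a.1 == k) = true then (k, v) else a).1 == k)) = false := by simp [h]
      have h2 : (!(a.1 == k)) = false := by simp [h]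
      simp only [h1, h2, Bool.false_eq_true, if_false]
      exact ih
    · have h1 : (!((if (a.1 == k) = true then (k, v) else a).1 == k)) = true := by simp [h]
      have h2 : (!(a.1 == k)) = true := by simp [h]
      simp only [h2, if_true, List.map_cons, if_neg h]
      rw [ih]

-- del of a just-overwritten key erases the original entry
lemma erase_insert_items (d : PySem.Dict String Int) (k : String) (v : Int)
    (hc : d.contains k = true) :
    ((d.insert k v).erase k).items = d.items.filter (fun p => !(p.1 == k)) := by
  simp only [PySem.Dict.erase, PySem.Dict.items_insert_of_contains _ _ hc, List.filter_map]
  exact map_filter_repl k v d.items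

-- Keys of a key-preserving filterMap are a sublist of the original keys.
lemma keys_filterMap_sublist (l : List (String × Int)) (f : String × Int → Option (String × Int))
    (hf : ∀ q r, f q = some r → r.1 = q.1) :
    ((l.filterMap f).map (fun x => x.1)).Sublist (l.map (fun x => x.1)) := by
  induction l with
  | nil => simp
  | cons a t ih =>
    cases hfa : f a with
    | none => simp [hfa]; exact ih.trans (List.sublist_cons_self _ _)
    | some r =>
      simp [hfa, hf a r hfa]
      exact ih

-- A's removal loop, characterised as a filterMap over the mainboard items.
lemma rem_items (os : List (String × Int)) (d : PySem.Dict String Int)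
    (hd : d.keys.Nodup) (ho : (os.map (fun x => x.1)).Nodup) :
    (os.foldl
      (fun d p =>
        if d.contains p.1 then
          if (d.insert p.1 (d.getD p.1 0 - p.2)).getD p.1 0 ≤ 0
          then (d.insert p.1 (d.getD p.1 0 - p.2)).erase p.1
          else d.insert p.1 (d.getD p.1 0 - p.2)
        else d) d).items
    = d.items.filterMap
        (fun q =>
          if !(PySem.Dict.mk os).contains q.1 || q.2 - (PySem.Dict.mk os).getD q.1 0 > 0
          then some (q.1, q.2 - (PySem.Dict.mk os).getD q.1 0) else none) := by
  induction os generalizing d with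
  | nil =>
    simp [PySem.Dict.contains, PySem.Dict.getD, PySem.Dict.get?]
  | cons a rest ih =>
    obtain ⟨k, n⟩ := a
    obtain ⟨ha, hrest⟩ := List.nodup_cons.mp ho
    simp only [List.foldl_cons]
    by_cases hc : d.contains k
    case neg =>
      rw [if_neg hc, ih d hd hrest]
      apply List.filterMap_congr
      intro q hq
      have hne : (k == q.1) = false := by
        have h0 : (q.1 == k) = false := by
          by_contra h
          exact hc (List.any_eq_true.mpr ⟨q, hq, by simpa using h⟩)
        rw [beq_eq_false_iff_ne] at h0 ⊢
        exact fun h => h0 h.symm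
      simp only [getD_mk_cons, contains_mk_cons]
      simp only [hne, Bool.false_or, Bool.false_eq_true, if_false]
    case pos =>
      rw [if_pos hc, PySem.Dict.getD_insert_self]
      have hgd := hgd_of_nodup d hd k
      have hcr : (PySem.Dict.mk rest : PySem.Dict String Int).contains k = false :=
        hcr_of_not_mem rest k ha
      by_cases hv : d.getD k 0 - n ≤ 0
      case pos =>
        rw [if_pos hv]
        have hitems := erase_insert_items d k (d.getD k 0 - n) hc
        have hnodup : ((d.insert k (d.getD k 0 - n)).erase k).keys.Nodup := by
          show (List.map (fun x => x.1) ((d.insert k (d.getD k 0 - n)).erase k).items).Nodup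
          rw [hitems]
          exact ((List.filter_sublist (l := d.items)).map (fun x : String × Int => x.1)).nodup hd
        rw [ih _ hnodup hrest, hitems, List.filterMap_filter]
        apply List.filterMap_congr
        intro q hq
        by_cases hk : (q.1 == k) = true
        · have hqe : q.1 = k := by simpa using hk
          have hkq : (k == q.1) = true := by simp [hqe]
          have hq2 : q.2 = d.getD k 0 := hgd q hq hk
          have hcond : ¬ (q.2 - (PySem.Dict.mk ((k, n) :: rest)).getD q.1 0 > 0) := by
            rw [getD_mk_cons, if_pos hkq]
            omega
          simp only [getD_mk_cons, contains_mk_cons, hkq, hk, Bool.true_or, Bool.not_true,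
            Bool.false_or]
          simp
          omega
        · rw [Bool.not_eq_true] at hk
          have hkq : (k == q.1) = false := by
            rw [beq_eq_false_iff_ne] at hk ⊢
            exact fun h => hk h.symm
          have hk' : (!(q.1 == k)) = true := by simp [hk]
          rw [if_pos hk']
          simp only [getD_mk_cons, contains_mk_cons]
          simp only [hkq, Bool.false_or, Bool.false_eq_true, if_false]
      case neg =>
        rw [if_neg hv]
        have hkeys : (d.insert k (d.getD k 0 - n)).keys = d.keys :=
          PySem.Dict.keys_insert_of_contains _ _ hc
        have hnodup : (d.insert k (d.getD k 0 - n)).keys.Nodup := by rw [hkeys]; exact hd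
        rw [ih _ hnodup hrest, PySem.Dict.items_insert_of_contains _ _ hc, List.filterMap_map]
        apply List.filterMap_congr
        intro q hq
        by_cases hk : (q.1 == k) = true
        · have hqe : q.1 = k := by simpa using hk
          have hkq : (k == q.1) = true := by simp [hqe]
          have hq2 : q.2 = d.getD k 0 := hgd q hq hk
          have hgd0 : (PySem.Dict.mk rest : PySem.Dict String Int).getD k 0 = 0 :=
            PySem.Dict.getD_of_not_contains _ 0 hcr
          simp only [Function.comp_apply, if_pos hk]
          simp only [getD_mk_cons, contains_mk_cons, hkq, Bool.true_or, Bool.not_true,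
            Bool.false_or]
          simp only [PySem.Dict.contains_mk] at hcr
          simp only [hgd0, sub_zero]
          have hlt : n < d.getD k 0 := by omega
          simp [hcr, hlt]
          exact ⟨by omega, hqe.symm, hq2.symm⟩
        · have hkb : (q.1 == k) = false := by rwa [Bool.not_eq_true] at hk
          have hkq : (k == q.1) = false := by
            rw [beq_eq_false_iff_ne] at hkb ⊢
            exact fun h => hkb h.symm
          simp only [Function.comp_apply, if_neg hk]
          simp only [getD_mk_cons, contains_mk_cons]
          simp only [hkq, Bool.false_or, Bool.false_eq_true, if_false]

-- A's addition loop, characterised as updated survivors ++ appended fresh cards_in entries.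
lemma add_items (ins : List (String × Int)) (d : PySem.Dict String Int)
    (hd : d.keys.Nodup) (hi : (ins.map (fun x => x.1)).Nodup) :
    (ins.foldl (fun d p => d.insert p.1 (d.getD p.1 0 + p.2)) d).items
    = d.items.map (fun q => (q.1, q.2 + (PySem.Dict.mk ins).getD q.1 0))
      ++ ins.filter (fun p => !((d.items.map (fun x => x.1)).contains p.1)) := by
  induction ins generalizing d with
  | nil =>
    simp [PySem.Dict.getD, PySem.Dict.get?]
  | cons a rest ih =>
    obtain ⟨k, n⟩ := a
    obtain ⟨ha, hrest⟩ := List.nodup_cons.mp hi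
    have hcr : (PySem.Dict.mk rest : PySem.Dict String Int).contains k = false :=
      hcr_of_not_mem rest k ha
    have hgd0 : (PySem.Dict.mk rest : PySem.Dict String Int).getD k 0 = 0 :=
      PySem.Dict.getD_of_not_contains _ 0 hcr
    simp only [List.foldl_cons]
    by_cases hc : d.contains k = true
    case pos =>
      have hkeys : (d.insert k (d.getD k 0 + n)).keys = d.keys :=
        PySem.Dict.keys_insert_of_contains _ _ hc
      have hnodup : (d.insert k (d.getD k 0 + n)).keys.Nodup := by rw [hkeys]; exact hd
      rw [ih _ hnodup hrest, PySem.Dict.items_insert_of_contains _ _ hc]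
      have hkeq : (d.items.map (fun p => if (p.1 == k) = true then (k, d.getD k 0 + n) else p)).map
          (fun x => x.1) = d.items.map (fun x => x.1) := by
        rw [List.map_map]
        apply List.map_congr_left
        intro q hq
        by_cases h : (q.1 == k) = true
        · simp [Function.comp_apply, (by simpa using h : q.1 = k)]
        · have h' : ¬ q.1 = k := by simpa using h
          simp [h']
      rw [hkeq, List.map_map]
      congr 1
      · apply List.map_congr_left
        intro q hq
        by_cases h : (q.1 == k) = true
        · have hqe : q.1 = k := by simpa using h
          have hkq : (k == q.1) = true := by simp [hqe]
          have hq2 : q.2 = d.getD k 0 := hgd_of_nodup d hd k q hq h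
          simp only [Function.comp_apply, if_pos h, getD_mk_cons, hgd0]
          rw [if_pos hkq, hqe, hq2]
          simp
        · have hkq : (k == q.1) = false := by
            have h' : (q.1 == k) = false := by rwa [Bool.not_eq_true] at h
            rw [beq_eq_false_iff_ne] at h' ⊢
            exact fun hh => h' hh.symm
          simp only [Function.comp_apply, if_neg h, getD_mk_cons, hkq, Bool.false_eq_true, if_false]
      · have hck : ((d.items.map (fun x => x.1)).contains k) = true := by
          rw [contains_keys_eq]
          exact hc
        rw [List.filter_cons]
        simp only [hck, Bool.not_true, Bool.false_eq_true, if_false]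
    case neg =>
      have hcf : d.contains k = false := by rwa [Bool.not_eq_true] at hc
      have hkeys : (d.insert k (d.getD k 0 + n)).keys = d.keys ++ [k] :=
        PySem.Dict.keys_insert_of_not_contains _ _ hcf
      have hnk : k ∉ d.keys := by
        intro hm
        rw [PySem.Dict.keys] at hm
        rcases List.mem_map.mp hm with ⟨p, hp, hpe⟩
        have : d.contains k = true := List.any_eq_true.mpr ⟨p, hp, by simp [hpe]⟩
        rw [hcf] at this
        exact absurd this (by simp)
      have hnodup : (d.insert k (d.getD k 0 + n)).keys.Nodup := by
        rw [hkeys]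
        rw [List.nodup_append]
        refine ⟨hd, List.nodup_singleton _, ?_⟩
        intro a ha' b hb hab
        simp only [List.mem_singleton] at hb
        exact hnk ((hab.trans hb) ▸ ha')
      rw [ih _ hnodup hrest, PySem.Dict.items_insert_of_not_contains _ _ hcf,
        PySem.Dict.getD_of_not_contains _ 0 hcf]
      rw [List.map_append, List.filter_cons]
      have hck : ((d.items.map (fun x => x.1)).contains k) = false := by
        rw [contains_keys_eq]; exact hcf
      simp only [hck, Bool.not_false]
      rw [if_pos trivial]
      have htailf : rest.filter
          (fun p => !(((d.items ++ [(k, 0 + n)]).map (fun x => x.1)).contains p.1))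
          = rest.filter (fun p => !((d.items.map (fun x => x.1)).contains p.1)) := by
        apply List.filter_congr
        intro p hp
        have hpk : p.1 ≠ k := by
          intro hh
          exact ha (hh ▸ List.mem_map_of_mem (f := fun x => x.1) hp)
        rw [List.contains_eq_mem, List.contains_eq_mem]
        simp [hpk]
      rw [htailf]
      have hmid : ([(k, 0 + n)].map (fun q => (q.1, q.2 + (PySem.Dict.mk rest).getD q.1 0)))
          = [(k, n)] := by
        simp [hgd0]
      rw [hmid, List.append_assoc]
      congr 1
      apply List.map_congr_left
      intro q hq
      have hq1 : (q.1 == k) = false := by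
        by_contra hcon
        have h1 : (q.1 == k) = true := by revert hcon; cases (q.1 == k) <;> simp
        have h2 : (d.items.any (fun p => p.1 == k)) = true :=
          List.any_eq_true.mpr ⟨q, hq, h1⟩
        have h3 : (d.items.any (fun p => p.1 == k)) = false := by
          simpa [PySem.Dict.contains] using hcf
        rw [h2] at h3
        exact absurd h3 (by simp)
      have hkq : (k == q.1) = false := by
        rw [beq_eq_false_iff_ne] at hq1 ⊢
        exact fun hh => (hq1) hh.symm
      simp only [getD_mk_cons, hkq, Bool.false_eq_true, if_false]

-- ==== bridge lemmas: A's staged form equals B's pointwise form ====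

-- the survivors' updated items equal B's head: filter the keys, then emit the closed-form count
lemma head_bridge_aux (M O I : PySem.Dict String Int) (l : List (String × Int))
    (hl : ∀ q ∈ l, q.2 = M.getD q.1 0 ∧ M.contains q.1 = true) :
    ((l.filterMap (fun q =>
        if !O.contains q.1 || q.2 - O.getD q.1 0 > 0
        then some (q.1, q.2 - O.getD q.1 0) else none)).map
      (fun q => (q.1, q.2 + I.getD q.1 0)))
    = ((l.map (fun p => p.1)).filter
        (fun c => M.contains c && (!O.contains c || decide (M.getD c 0 - O.getD c 0 > 0)))).map
      (fun c => (c, if M.contains c && (!O.contains c || decide (M.getD c 0 - O.getD c 0 > 0))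
                    then M.getD c 0 - O.getD c 0 + I.getD c 0 else I.getD c 0)) := by
  induction l with
  | nil => rfl
  | cons a t ih =>
    obtain ⟨hv, hcM⟩ := hl a (List.mem_cons_self ..)
    have iht := ih (fun q hq => hl q (List.mem_cons_of_mem a hq))
    have hcond : (!O.contains a.1 || decide (a.2 - O.getD a.1 0 > 0))
        = (M.contains a.1 && (!O.contains a.1 || decide (M.getD a.1 0 - O.getD a.1 0 > 0))) := by
      rw [hcM, ← hv]
      simp
    cases hb : (!O.contains a.1 || decide (a.2 - O.getD a.1 0 > 0)) with
    | true =>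
      have hb' : (M.contains a.1
          && (!O.contains a.1 || decide (M.getD a.1 0 - O.getD a.1 0 > 0))) = true := hcond ▸ hb
      have hfa : (if (!O.contains a.1 || decide (a.2 - O.getD a.1 0 > 0)) = true
          then some (a.1, a.2 - O.getD a.1 0) else none) = some (a.1, a.2 - O.getD a.1 0) := by
        rw [if_pos hb]
      rw [List.filterMap_cons_some (f := fun q : String × Int => if (!O.contains q.1 || decide (q.2 - O.getD q.1 0 > 0)) = true then some (q.1, q.2 - O.getD q.1 0) else none) (by exact hfa), List.map_cons, List.map_cons, List.filter_cons,
        if_pos hb', List.map_cons, if_pos hb', iht, hv]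
    | false =>
      have hb' : (M.contains a.1
          && (!O.contains a.1 || decide (M.getD a.1 0 - O.getD a.1 0 > 0))) = false := hcond ▸ hb
      have hfa : (if (!O.contains a.1 || decide (a.2 - O.getD a.1 0 > 0)) = true
          then some (a.1, a.2 - O.getD a.1 0) else none) = none := by
        rw [if_neg (by rw [hb]; exact Bool.false_ne_true)]
      rw [List.filterMap_cons_none (f := fun q : String × Int => if (!O.contains q.1 || decide (q.2 - O.getD q.1 0 > 0)) = true then some (q.1, q.2 - O.getD q.1 0) else none) (by exact hfa), List.map_cons, List.filter_cons,
        if_neg (by rw [hb']; exact Bool.false_ne_true), iht]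

-- a key is among the survivors' keys iff it survives
lemma kept_contains (M O : PySem.Dict String Int) (hM : M.keys.Nodup) (c : String) :
    ((M.items.filterMap (fun q =>
        if !O.contains q.1 || q.2 - O.getD q.1 0 > 0
        then some (q.1, q.2 - O.getD q.1 0) else none)).map (fun x => x.1)).contains c
    = (M.contains c && (!O.contains c || decide (M.getD c 0 - O.getD c 0 > 0))) := by
  rw [List.contains_eq_mem]
  by_cases hs : (M.contains c && (!O.contains c || decide (M.getD c 0 - O.getD c 0 > 0))) = true
  · rw [hs]
    obtain ⟨hcM, hrest⟩ := Bool.and_eq_true .. |>.mp hs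
    rcases List.any_eq_true.mp hcM with ⟨q, hq, hqc⟩
    have hq2 : q.2 = M.getD c 0 := hgd_of_nodup M hM c q hq hqc
    have hqe : q.1 = c := by simpa using hqc
    have hbp : (!O.contains q.1 || decide (q.2 - O.getD q.1 0 > 0)) = true := by
      rw [hqe, hq2]
      exact hrest
    simp only [decide_eq_true_eq]
    exact List.mem_map.mpr ⟨(q.1, q.2 - O.getD q.1 0),
      List.mem_filterMap.mpr ⟨q, hq, by rw [if_pos hbp]⟩, hqe⟩
  · have hs' := Bool.not_eq_true _ |>.mp hs
    rw [hs']
    simp only [decide_eq_false_iff_not]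
    intro hmem
    rcases List.mem_map.mp hmem with ⟨r, hr, hre⟩
    rcases List.mem_filterMap.mp hr with ⟨q, hq, hfq⟩
    by_cases hbp : (!O.contains q.1 || decide (q.2 - O.getD q.1 0 > 0)) = true
    · rw [if_pos hbp] at hfq
      cases hfq
      have hqe : q.1 = c := hre
      have hcM : M.contains c = true :=
        List.any_eq_true.mpr ⟨q, hq, by simp [hqe]⟩
      have hq2 : q.2 = M.getD c 0 := hgd_of_nodup M hM c q hq (by simp [hqe])
      apply hs
      rw [Bool.and_eq_true]
      refine ⟨hcM, ?_⟩
      have hq2' : M.getD q.1 0 = q.2 := by rw [hq2, hqe]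
      rw [← hqe, hq2']
      exact hbp
    · rw [if_neg hbp] at hfq
      exact absurd hfq (by simp)

-- the appended cards_in entries equal B's tail comprehension
lemma tail_bridge_aux (I : PySem.Dict String Int) (surv : String → Bool)
    (l : List (String × Int)) (hl : ∀ p ∈ l, p.2 = I.getD p.1 0) :
    l.filter (fun p => !surv p.1)
    = ((l.map (fun p => p.1)).filter (fun c => !surv c)).map
        (fun c => (c, if surv c then 0 else I.getD c 0)) := by
  induction l with
  | nil => rfl
  | cons a t ih =>
    have hv := hl a (List.mem_cons_self ..)
    have iht := ih (fun p hp => hl p (List.mem_cons_of_mem a hp))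
    simp only [List.map_cons, List.filter_cons]
    cases hs : surv a.1 with
    | true => simpa [hs] using iht
    | false =>
      simp only [hs, Bool.not_false, if_pos trivial, List.map_cons, Bool.false_eq_true, if_false]
      rw [← iht, ← hv]

-- ===== VERDICT (by name: the statement is the Claim_ definition above) =====
theorem apply_sideboard_spec : Claim_equal_apply_sideboard := by
  intro mainboard sideboard cards_in cards_out _
  unfold Spec_apply_sideboard apply_sideboard apply_sideboard_alt
  simp only []
  have hfkey : ∀ (q r : String × Int),
      (if !(PySem.Dict.mk (PySem.Dict.ofList cards_out).items).contains q.1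
          || q.2 - (PySem.Dict.mk (PySem.Dict.ofList cards_out).items).getD q.1 0 > 0
       then some (q.1, q.2 - (PySem.Dict.mk (PySem.Dict.ofList cards_out).items).getD q.1 0)
       else none) = some r → r.1 = q.1 := by
    intro q r h; split at h
    · injection h with h'; rw [← h']
    · exact absurd h (by simp)
  have hM : (PySem.Dict.ofList mainboard : PySem.Dict String Int).keys.Nodup :=
    PySem.Dict.nodup_keys_ofList _
  have hO : (((PySem.Dict.ofList cards_out : PySem.Dict String Int)).items.map (fun x => x.1)).Nodup :=
    PySem.Dict.nodup_keys_ofList _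
  have hI : (((PySem.Dict.ofList cards_in : PySem.Dict String Int)).items.map (fun x => x.1)).Nodup :=
    PySem.Dict.nodup_keys_ofList _
  have hrem := rem_items (PySem.Dict.ofList cards_out).items (PySem.Dict.ofList mainboard) hM hO
  have hD1 : ((PySem.Dict.ofList cards_out).items.foldl
      (fun d p =>
        if d.contains p.1 then
          if (d.insert p.1 (d.getD p.1 0 - p.2)).getD p.1 0 ≤ 0
          then (d.insert p.1 (d.getD p.1 0 - p.2)).erase p.1
          else d.insert p.1 (d.getD p.1 0 - p.2)
        else d) (PySem.Dict.ofList mainboard)).keys.Nodup := by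
    show (List.map (fun x => x.1) (List.foldl
      (fun d p =>
        if d.contains p.1 then
          if (d.insert p.1 (d.getD p.1 0 - p.2)).getD p.1 0 ≤ 0
          then (d.insert p.1 (d.getD p.1 0 - p.2)).erase p.1
          else d.insert p.1 (d.getD p.1 0 - p.2)
        else d) (PySem.Dict.ofList mainboard) (PySem.Dict.ofList cards_out).items).items).Nodup
    rw [hrem]
    exact ((keys_filterMap_sublist _ _ hfkey).nodup hM)
  rw [add_items _ _ hD1 hI, hrem]
  have hmemI : ∀ p ∈ (PySem.Dict.ofList cards_in : PySem.Dict String Int).items,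
      p.2 = (PySem.Dict.ofList cards_in : PySem.Dict String Int).getD p.1 0 := by
    intro p hp
    exact hgd_of_nodup _ (PySem.Dict.nodup_keys_ofList _) p.1 p hp (by simp)
  have hmemM : ∀ q ∈ (PySem.Dict.ofList mainboard : PySem.Dict String Int).items,
      q.2 = (PySem.Dict.ofList mainboard : PySem.Dict String Int).getD q.1 0 ∧
      (PySem.Dict.ofList mainboard : PySem.Dict String Int).contains q.1 = true := by
    intro q hq
    refine ⟨hgd_of_nodup _ hM q.1 q hq (by simp), ?_⟩
    exact List.any_eq_true.mpr ⟨q, hq, by simp⟩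
  rw [List.map_append]
  congr 1
  · exact head_bridge_aux (PySem.Dict.ofList mainboard) (PySem.Dict.ofList cards_out)
      (PySem.Dict.ofList cards_in) _ hmemM
  · rw [List.filter_congr (fun p _ => by
      rw [kept_contains (PySem.Dict.ofList mainboard) (PySem.Dict.ofList cards_out) hM p.1])]
    rw [tail_bridge_aux (PySem.Dict.ofList cards_in)
      (fun c => (PySem.Dict.ofList mainboard : PySem.Dict String Int).contains c &&
        (!(PySem.Dict.ofList cards_out : PySem.Dict String Int).contains c ||
          decide ((PySem.Dict.ofList mainboard : PySem.Dict String Int).getD c 0 -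
            (PySem.Dict.ofList cards_out : PySem.Dict String Int).getD c 0 > 0))) _ hmemI]
    apply List.map_congr_left
    intro c hc
    have hcf : (((PySem.Dict.ofList mainboard : PySem.Dict String Int).contains c &&
        (!(PySem.Dict.ofList cards_out : PySem.Dict String Int).contains c ||
          decide ((PySem.Dict.ofList mainboard : PySem.Dict String Int).getD c 0 -
            (PySem.Dict.ofList cards_out : PySem.Dict String Int).getD c 0 > 0)))) = false := by
      rcases List.mem_filter.mp hc with ⟨_, hcc⟩
      rw [Bool.not_eq_true'] at hcc
      exact hcc
    refine congrArg (Prod.mk c) ?_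
    split_ifs with h
    · rw [hcf] at h
      exact absurd h Bool.false_ne_true
    · rfl
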